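-- pv_equiv track=rewrite | github.com/Adam-Jimenez/binarysearch-editorials | Remove Sublist to Reach Equilibrium.py | solve
-- ===== SOURCE A (Python) =====
-- def solve(nums, k):
--     if sum((n<k)*-1+(n>k)*1 for n in nums) == 0: return len(nums)
--     def prefix(l):
--         pf=[0]
--         for n in l:
--             inc=0
--             if n>k: inc=1
--             if n<k: inc=-1
--             pf.append(pf[-1]+inc)
--         pf.pop()
--         return pf
--     left=prefix(nums)
--     right=prefix(nums[::-1])[::-1]
--     seen={}
--     ans=0
--     for i in range(len(right)-1,-1,-1):
--         seen[right[i]]=i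
--         n=left[i]
--         if -n in seen:
--             j=seen[-n]
--             ans=max(ans,len(nums)-(j-i+1))
--     return ans
-- ===== SOURCE B (Python) =====
-- def solve(nums, k):
--     # Forward scan over one sign-prefix array: minimise the removed window
--     # length (b - a with P[b] - P[a] == S) using a last-occurrence dict.
--     P = [0]
--     for x in nums:
--         P.append(P[-1] + (1 if x > k else -1 if x < k else 0))
--     S = P[-1]
--     if S == 0:
--         return len(nums)
--     last = {}
--     best = len(nums)
--     for b, p in enumerate(P):
--         a = last.get(p - S)
--         if a is not None:
--             best = min(best, b - a)
--         last[p] = b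
--     return len(nums) - best
-- ===== Notes on version B (the rewrite author's own statement) =====
-- stated objective: simpler
-- what changed: A builds two prefix arrays (left, plus a suffix array made by prefix-summing the reversed list and reversing), scans indices backwards keeping the minimal index of each suffix value and maximises the kept length; B builds one sign-prefix array, scans it forwards once keeping the last index of each prefix value, minimises the removed window length b-a with P[b]-P[a]=S, and returns len(nums) minus it.
import Mathlib
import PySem

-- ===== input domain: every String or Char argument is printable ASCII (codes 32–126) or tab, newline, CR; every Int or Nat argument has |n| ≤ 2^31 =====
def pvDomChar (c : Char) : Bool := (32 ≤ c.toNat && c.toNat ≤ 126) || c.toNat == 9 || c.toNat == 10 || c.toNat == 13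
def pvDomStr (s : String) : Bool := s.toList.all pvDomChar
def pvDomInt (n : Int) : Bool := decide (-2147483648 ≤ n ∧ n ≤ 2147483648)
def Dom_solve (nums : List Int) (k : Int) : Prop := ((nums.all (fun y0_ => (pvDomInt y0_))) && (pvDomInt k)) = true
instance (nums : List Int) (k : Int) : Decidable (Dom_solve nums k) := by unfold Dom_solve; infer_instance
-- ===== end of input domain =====

-- B replaces A's two prefix arrays and backward max-kept scan by one sign-prefix
-- array and a single forward scan that minimises the removed window via a
-- last-occurrence dict; objective: simpler (return value proved equal on all inputs).

-- ===== PORT A =====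
-- helper: A's inner `prefix(l)` (build pf by appending pf[-1]+inc, then pop the last entry)
def solvePrefixA (k : Int) (l : List Int) : List Int :=
  (l.foldl (fun pf n =>
      let inc : Int := 0
      let inc := if n > k then (1 : Int) else inc
      let inc := if n < k then (-1 : Int) else inc
      pf ++ [PySem.List.pyGetD pf (-1) 0 + inc]) [0]).dropLast

def solve (nums : List Int) (k : Int) : Int :=
  if (nums.map (fun n => (if n < k then (1 : Int) else 0) * (-1) + (if n > k then (1 : Int) else 0) * 1)).sum = 0 then
    (nums.length : Int)
  else
    let left := solvePrefixA k nums
    let right := (solvePrefixA k nums.reverse).reverse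
    let st := (PySem.List.pyRange ((right.length : Int) - 1) (-1) (-1)).foldl
      (fun (st : PySem.Dict Int Int × Int) i =>
        let seen := st.1.insert (PySem.List.pyGetD right i 0) i
        let m := PySem.List.pyGetD left i 0
        match seen.get? (-m) with
        | some j => (seen, max st.2 ((nums.length : Int) - (j - i + 1)))
        | none => (seen, st.2))
      (PySem.Dict.empty, 0)
    st.2

-- ===== PORT B =====
def solve_alt (nums : List Int) (k : Int) : Int :=
  let P := nums.foldl (fun acc x =>
      acc ++ [PySem.List.pyGetD acc (-1) 0 + (if x > k then (1 : Int) else if x < k then -1 else 0)]) [0]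
  let S := PySem.List.pyGetD P (-1) 0
  if S = 0 then (nums.length : Int)
  else
    let st := (PySem.List.enumerate P 0).foldl
      (fun (st : PySem.Dict Int Int × Int) bp =>
        let best := match st.1.get? (bp.2 - S) with
          | some a => min st.2 (bp.1 - a)
          | none => st.2
        (st.1.insert bp.2 bp.1, best))
      (PySem.Dict.empty, (nums.length : Int))
    (nums.length : Int) - st.2

-- ===== PRECONDITION & SPEC =====
def Spec_solve (nums : List Int) (k : Int) (out : Int) : Prop := out = solve_alt nums k
instance (nums : List Int) (k : Int) (out : Int) : Decidable (Spec_solve nums k out) := by unfold Spec_solve; infer_instance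

-- ===== CLAIM (what is proved, stated in full; the proofs are below) =====
def Claim_equal_solve : Prop := ∀ (nums : List Int) (k : Int), Dom_solve nums k → Spec_solve nums k (solve nums k)

-- ===== LEMMAS AND PROOFS =====

-- sign of x relative to k (what both programs add into their prefix sums)
def sgn (k x : Int) : Int := if x > k then 1 else if x < k then -1 else 0

-- sign-weighted prefix sum of the first t elements
def Pf (nums : List Int) (k : Int) (t : Nat) : Int := ((nums.take t).map (sgn k)).sum

-- the value A's `right[j]` holds: total sign sum minus the prefix of length j+1
def rF (nums : List Int) (k : Int) (j : Nat) : Int :=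
  Pf nums k nums.length - Pf nums k (j + 1)

-- a removable window [a, b): removing it balances the sign sum
def Valid (nums : List Int) (k : Int) (a b : Nat) : Prop :=
  a < b ∧ b ≤ nums.length ∧ Pf nums k b - Pf nums k a = Pf nums k nums.length

-- the common shape of both programs' prefix-building loop
def pstep (k : Int) (pf : List Int) (x : Int) : List Int :=
  pf ++ [PySem.List.pyGetD pf (-1) 0 + sgn k x]

lemma Pf_cons (x : Int) (t : List Int) (k : Int) (s : Nat) :
    Pf (x :: t) k (s + 1) = sgn k x + Pf t k s := by
  simp [Pf]

lemma fold_pstep (k : Int) (l : List Int) : ∀ (acc : List Int) (g : Int),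
    PySem.List.pyGetD acc (-1) 0 = g →
    l.foldl (pstep k) acc
      = acc ++ (List.range l.length).map (fun t => g + Pf l k (t + 1)) := by
  induction l with
  | nil => intro acc g _; simp
  | cons x t ih =>
    intro acc g hg
    rw [List.foldl_cons]
    rw [ih (pstep k acc x) (g + sgn k x)
      (by simp [pstep, hg, PySem.List.pyGetD_neg_one_append_singleton])]
    simp only [pstep, hg, List.length_cons, List.append_assoc, List.singleton_append]
    congr 1
    rw [List.range_succ_eq_map, List.map_cons, List.map_map]
    congr 1
    · simp [Pf]
    · apply List.map_congr_left
      intro s _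
      simp only [Function.comp, Nat.succ_eq_add_one, Pf_cons]
      ring

lemma fold_pstep_zero (k : Int) (l : List Int) :
    l.foldl (pstep k) [0] = (List.range (l.length + 1)).map (Pf l k) := by
  rw [fold_pstep k l [0] 0 rfl, List.range_succ_eq_map, List.map_cons, List.map_map]
  simp [Pf, Nat.succ_eq_add_one]

lemma lamA_eq_pstep (k : Int) :
    (fun (pf : List Int) (n : Int) =>
      let inc : Int := 0
      let inc := if n > k then (1 : Int) else inc
      let inc := if n < k then (-1 : Int) else inc
      pf ++ [PySem.List.pyGetD pf (-1) 0 + inc]) = pstep k := by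
  funext pf n
  simp only [pstep, sgn]
  congr 2
  split_ifs <;> omega

lemma solvePrefixA_eq (k : Int) (l : List Int) :
    solvePrefixA k l = (List.range l.length).map (Pf l k) := by
  unfold solvePrefixA
  rw [lamA_eq_pstep, fold_pstep_zero, List.range_succ, List.map_append]
  simp

lemma Pf_reverse (l : List Int) (k : Int) (t : Nat) :
    Pf l.reverse k t = Pf l k l.length - Pf l k (l.length - t) := by
  unfold Pf
  rw [List.take_reverse, List.map_reverse, List.sum_reverse,
    List.take_of_length_le (le_refl l.length)]
  have hsum : (l.map (sgn k)).sum
      = ((l.take (l.length - t)).map (sgn k)).sum + ((l.drop (l.length - t)).map (sgn k)).sum := by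
    conv_lhs => rw [← List.take_append_drop (l.length - t) l]
    rw [List.map_append, List.sum_append]
  omega

lemma right_eq (nums : List Int) (k : Int) :
    (solvePrefixA k nums.reverse).reverse = (List.range nums.length).map (rF nums k) := by
  rw [solvePrefixA_eq, List.length_reverse]
  apply List.ext_getElem
  · simp
  · intro i h1 h2
    simp only [List.length_reverse, List.length_map, List.length_range] at h1 h2
    rw [List.getElem_reverse]
    simp only [List.getElem_map, List.getElem_range, List.length_map, List.length_range]
    rw [Pf_reverse]
    unfold rF
    congr 2
    omega

-- A's loop body, applied to loop counter m (its index i is nums.length - 1 - m)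
def gA (nums : List Int) (k : Int) (st : PySem.Dict Int Int × Int) (m : Nat) :
    PySem.Dict Int Int × Int :=
  match (st.1.insert (rF nums k (nums.length - 1 - m)) ((nums.length - 1 - m : Nat) : Int)).get?
      (-(Pf nums k (nums.length - 1 - m))) with
  | some j =>
      (st.1.insert (rF nums k (nums.length - 1 - m)) ((nums.length - 1 - m : Nat) : Int),
       max st.2 ((nums.length : Int) - (j - ((nums.length - 1 - m : Nat) : Int) + 1)))
  | none =>
      (st.1.insert (rF nums k (nums.length - 1 - m)) ((nums.length - 1 - m : Nat) : Int), st.2)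

-- B's loop body, applied to index t (its dict key is the prefix value Pf t)
def gB (nums : List Int) (k : Int) (st : PySem.Dict Int Int × Int) (t : Nat) :
    PySem.Dict Int Int × Int :=
  (st.1.insert (Pf nums k t) ((t : Nat) : Int),
   match st.1.get? (Pf nums k t - Pf nums k nums.length) with
   | some a => min st.2 ((t : Int) - a)
   | none => st.2)

lemma loopA_conv (nums : List Int) (k : Int) :
    (PySem.List.pyRange ((((List.range nums.length).map (rF nums k)).length : Int) - 1) (-1) (-1)).foldl
      (fun (st : PySem.Dict Int Int × Int) i =>
        match (st.1.insert (PySem.List.pyGetD ((List.range nums.length).map (rF nums k)) i 0) i).get?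
            (-(PySem.List.pyGetD ((List.range nums.length).map (Pf nums k)) i 0)) with
        | some j => (st.1.insert (PySem.List.pyGetD ((List.range nums.length).map (rF nums k)) i 0) i,
            max st.2 ((nums.length : Int) - (j - i + 1)))
        | none => (st.1.insert (PySem.List.pyGetD ((List.range nums.length).map (rF nums k)) i 0) i, st.2))
      (PySem.Dict.empty, 0)
    = (List.range nums.length).foldl (gA nums k) (PySem.Dict.empty, 0) := by
  rw [List.length_map, List.length_range, PySem.List.pyRange_neg_one]
  have hn : ((nums.length : Int) - 1 - (-1)).toNat = nums.length := by omega
  rw [hn, List.foldl_map]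
  apply PySem.List.foldl_congr_mem
  intro acc m hm
  rw [List.mem_range] at hm
  have hi : (nums.length : Int) - 1 - (m : Int) = ((nums.length - 1 - m : Nat) : Int) := by
    omega
  have hlt : nums.length - 1 - m < nums.length := by omega
  rw [hi]
  simp only [PySem.List.pyGetD_natCast, PySem.List.getD_map_range _ _ _ _ hlt, gA]

lemma loopB_conv (nums : List Int) (k : Int) :
    (PySem.List.enumerate ((List.range (nums.length + 1)).map (Pf nums k)) 0).foldl
      (fun (st : PySem.Dict Int Int × Int) bp =>
        (st.1.insert bp.2 bp.1,
         match st.1.get? (bp.2 - Pf nums k nums.length) with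
         | some a => min st.2 (bp.1 - a)
         | none => st.2))
      (PySem.Dict.empty, (nums.length : Int))
    = (List.range (nums.length + 1)).foldl (gB nums k) (PySem.Dict.empty, (nums.length : Int)) := by
  rw [PySem.List.enumerate_eq_map_pyRange _ 0]
  have hlen : PySem.List.len ((List.range (nums.length + 1)).map (Pf nums k))
      = ((nums.length + 1 : Nat) : Int) := by
    simp [PySem.List.len]
  rw [hlen, PySem.List.pyRange_zero_nat, List.map_map, List.foldl_map]
  apply PySem.List.foldl_congr_mem
  intro acc t ht
  rw [List.mem_range] at ht
  simp only [Function.comp, PySem.List.pyGetD_natCast,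
    PySem.List.getD_map_range _ _ _ _ ht, gB]

-- dict invariant of A's loop: `seen` maps each suffix value to its SMALLEST index ≥ n-m
def InvA (nums : List Int) (k : Int) (m : Nat) (d : PySem.Dict Int Int) : Prop :=
  ∀ v a : Int, d.get? v = some a ↔ ∃ j : Nat, nums.length - m ≤ j ∧ j < nums.length ∧
    a = (j : Int) ∧ rF nums k j = v ∧
    ∀ j' : Nat, nums.length - m ≤ j' → j' < j → rF nums k j' ≠ v

-- `ans` is the best kept length over windows starting at a ≥ n-m (0 if none seen)
def AnsA (nums : List Int) (k : Int) (m : Nat) (ans : Int) : Prop :=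
  (ans = 0 ∨ ∃ a b : Nat, Valid nums k a b ∧ nums.length - m ≤ a ∧
      ans = (nums.length : Int) - ((b : Int) - (a : Int)))
  ∧ (∀ a b : Nat, Valid nums k a b → nums.length - m ≤ a →
      (nums.length : Int) - ((b : Int) - (a : Int)) ≤ ans)
  ∧ 0 ≤ ans

-- dict invariant of B's loop: `last` maps each prefix value to its LARGEST index < m
def InvB (nums : List Int) (k : Int) (m : Nat) (d : PySem.Dict Int Int) : Prop :=
  ∀ v a : Int, d.get? v = some a ↔ ∃ j : Nat, j < m ∧ a = (j : Int) ∧ Pf nums k j = v ∧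
    ∀ j' : Nat, j < j' → j' < m → Pf nums k j' ≠ v

-- `best` is the smallest removable-window length with right end < m (n if none seen)
def BestB (nums : List Int) (k : Int) (m : Nat) (best : Int) : Prop :=
  (best = (nums.length : Int) ∨ ∃ a b : Nat, a < b ∧ b < m ∧
      Pf nums k b - Pf nums k a = Pf nums k nums.length ∧ best = (b : Int) - (a : Int))
  ∧ (∀ a b : Nat, a < b → b < m → Pf nums k b - Pf nums k a = Pf nums k nums.length →
      best ≤ (b : Int) - (a : Int))
  ∧ best ≤ (nums.length : Int)

lemma A_inv (nums : List Int) (k : Int) : ∀ m, m ≤ nums.length →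
    InvA nums k m ((List.range m).foldl (gA nums k) (PySem.Dict.empty, 0)).1 ∧
    AnsA nums k m ((List.range m).foldl (gA nums k) (PySem.Dict.empty, 0)).2 := by
  intro m
  induction m with
  | zero =>
    intro _
    constructor
    · intro v a
      simp only [List.range_zero, List.foldl_nil, PySem.Dict.get?_empty]
      constructor
      · intro h; exact absurd h (by simp)
      · rintro ⟨j, h1, h2, -⟩; omega
    · refine ⟨Or.inl rfl, ?_, le_refl 0⟩
      rintro a b ⟨hab, hbn, -⟩ ha; omega
  | succ m ih =>
    intro hm1
    have hm : m ≤ nums.length := by omega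
    obtain ⟨ihI, ihA⟩ := ih hm
    rw [List.range_succ, List.foldl_append, List.foldl_cons, List.foldl_nil]
    set st := (List.range m).foldl (gA nums k) (PySem.Dict.empty, (0 : Int)) with hst
    set i : Nat := nums.length - 1 - m with hidef
    have hiwin : nums.length - (m + 1) = i := by omega
    have hin : i < nums.length := by omega
    -- the dict after this iteration's insert
    have hInv' : InvA nums k (m + 1) (st.1.insert (rF nums k i) (i : Int)) := by
      intro v a
      rw [PySem.Dict.get?_insert]
      split_ifs with hv
      · subst hv
        constructor
        · intro h
          refine ⟨i, by omega, hin, ?_, rfl, ?_⟩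
          · injection h with h'; omega
          · intro j' h1 h2; omega
        · rintro ⟨j, hj1, hj2, rfl, hj4, hj5⟩
          have hij : i ≤ j := by omega
          rcases eq_or_lt_of_le hij with heq | hlt
          · rw [← heq]
          · exact absurd rfl (hj5 i (by omega) hlt)
      · rw [ihI v a]
        constructor
        · rintro ⟨j, hj1, hj2, hj3, hj4, hj5⟩
          refine ⟨j, by omega, hj2, hj3, hj4, ?_⟩
          intro j' h1 h2
          have hij' : i ≤ j' := by omega
          rcases eq_or_lt_of_le hij' with heq | hlt
          · rw [← heq]; intro hc; exact hv hc.symm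
          · exact hj5 j' (by omega) h2
        · rintro ⟨j, hj1, hj2, hj3, hj4, hj5⟩
          have hji : j ≠ i := by
            intro h; rw [h] at hj4; exact hv hj4.symm
          refine ⟨j, by omega, hj2, hj3, hj4, ?_⟩
          intro j' h1 h2
          exact hj5 j' (by omega) h2
    -- case on the lookup
    rcases hlk : (st.1.insert (rF nums k i) (i : Int)).get? (-(Pf nums k i)) with _ | jI
    · -- none: no window starts at i
      simp only [gA, ← hidef, hlk]
      refine ⟨hInv', ?_, ?_, ihA.2.2⟩
      · rcases ihA.1 with h0 | ⟨a, b, hV, ha, hans⟩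
        · exact Or.inl h0
        · exact Or.inr ⟨a, b, hV, by omega, hans⟩
      · rintro a b hV ha
        rw [hiwin] at ha
        rcases eq_or_lt_of_le ha with heq | hlt
        · -- a = i: contradiction with the failed lookup
          exfalso
          obtain ⟨hab, hbn, hS⟩ := hV
          rw [← heq] at hab hS
          have hPb : ∃ j, i ≤ j ∧ j < nums.length ∧ rF nums k j = -(Pf nums k i) := by
            refine ⟨b - 1, by omega, by omega, ?_⟩
            unfold rF
            have hb1 : b - 1 + 1 = b := by omega
            rw [hb1]; omega
          classical
          have hspec := Nat.find_spec hPb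
          have hsome : (st.1.insert (rF nums k i) (i : Int)).get? (-(Pf nums k i))
              = some ((Nat.find hPb : Nat) : Int) := by
            rw [hInv' (-(Pf nums k i)) ((Nat.find hPb : Nat) : Int)]
            refine ⟨Nat.find hPb, by omega, hspec.2.1, rfl, hspec.2.2, ?_⟩
            intro j' h1 h2 hc
            exact Nat.find_min hPb h2 ⟨by omega, by omega, hc⟩
          rw [hlk] at hsome; exact absurd hsome (by simp)
        · exact ihA.2.1 a b hV (by omega)
    · -- some jI: a minimal matching suffix index exists
      obtain ⟨j, hj1, hj2, hj3, hj4, hj5⟩ := (hInv' (-(Pf nums k i)) jI).mp hlk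
      rw [hiwin] at hj1 hj5
      subst hj3
      simp only [gA, ← hidef, hlk]
      have hSj : Pf nums k (j + 1) - Pf nums k i = Pf nums k nums.length := by
        unfold rF at hj4; omega
      have hVij : Valid nums k i (j + 1) := ⟨by omega, by omega, hSj⟩
      refine ⟨hInv', ?_, ?_, ?_⟩
      · rcases le_total ((nums.length : Int) - ((j : Int) - (i : Int) + 1)) st.2 with hle | hle
        · rw [max_eq_left hle]
          rcases ihA.1 with h0 | ⟨a, b, hV, ha, hans⟩
          · exact Or.inl h0
          · exact Or.inr ⟨a, b, hV, by omega, hans⟩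
        · rw [max_eq_right hle]
          refine Or.inr ⟨i, j + 1, hVij, by omega, ?_⟩
          push_cast
          ring
      · rintro a b hV ha
        rw [hiwin] at ha
        rcases eq_or_lt_of_le ha with heq | hlt
        · -- a = i: minimality of j gives the bound
          obtain ⟨hab, hbn, hS⟩ := hV
          rw [← heq] at hab hS ⊢
          have hjb : j ≤ b - 1 := by
            by_contra hcon
            rw [Nat.not_le] at hcon
            refine hj5 (b - 1) (by omega) (by omega) ?_
            unfold rF
            have hb1 : b - 1 + 1 = b := by omega
            rw [hb1]; omega
          refine le_trans ?_ (le_max_right _ _)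
          omega
        · exact le_trans (ihA.2.1 a b hV (by omega)) (le_max_left _ _)
      · exact le_trans ihA.2.2 (le_max_left _ _)

lemma B_inv (nums : List Int) (k : Int) : ∀ m,
    InvB nums k m ((List.range m).foldl (gB nums k) (PySem.Dict.empty, (nums.length : Int))).1 ∧
    BestB nums k m ((List.range m).foldl (gB nums k) (PySem.Dict.empty, (nums.length : Int))).2 := by
  intro m
  induction m with
  | zero =>
    constructor
    · intro v a
      simp only [List.range_zero, List.foldl_nil, PySem.Dict.get?_empty]
      constructor
      · intro h; exact absurd h (by simp)
      · rintro ⟨j, h1, -⟩; omega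
    · refine ⟨Or.inl rfl, ?_, le_refl _⟩
      rintro a b hab hb0 -; omega
  | succ m ih =>
    obtain ⟨ihI, ihB⟩ := ih
    rw [List.range_succ, List.foldl_append, List.foldl_cons, List.foldl_nil]
    set st := (List.range m).foldl (gB nums k) (PySem.Dict.empty, (nums.length : Int)) with hst
    have hInv' : InvB nums k (m + 1) (st.1.insert (Pf nums k m) ((m : Nat) : Int)) := by
      intro v a
      rw [PySem.Dict.get?_insert]
      split_ifs with hv
      · subst hv
        constructor
        · intro h
          refine ⟨m, by omega, ?_, rfl, ?_⟩
          · injection h with h'; omega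
          · intro j' h1 h2; omega
        · rintro ⟨j, hj1, rfl, hj3, hj4⟩
          rcases Nat.lt_succ_iff_lt_or_eq.mp hj1 with hlt | heq
          · exact absurd rfl (hj4 m hlt (by omega))
          · rw [heq]
      · rw [ihI v a]
        constructor
        · rintro ⟨j, hj1, hj2, hj3, hj4⟩
          refine ⟨j, by omega, hj2, hj3, ?_⟩
          intro j' h1 h2
          rcases Nat.lt_succ_iff_lt_or_eq.mp h2 with hlt | heq
          · exact hj4 j' h1 hlt
          · rw [heq]; intro hc; exact hv hc.symm
        · rintro ⟨j, hj1, hj2, hj3, hj4⟩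
          have hjm : j ≠ m := by
            intro h; rw [h] at hj3; exact hv hj3.symm
          refine ⟨j, by omega, hj2, hj3, ?_⟩
          intro j' h1 h2
          exact hj4 j' h1 (by omega)
    rcases hlk : st.1.get? (Pf nums k m - Pf nums k nums.length) with _ | aI
    · -- none: no removable window ends at m
      simp only [gB, hlk]
      refine ⟨hInv', ?_, ?_, ihB.2.2⟩
      · rcases ihB.1 with h0 | ⟨a, b, hab, hbm, hS, hbest⟩
        · exact Or.inl h0
        · exact Or.inr ⟨a, b, hab, by omega, hS, hbest⟩
      · rintro a b hab hbm1 hS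
        rcases Nat.lt_succ_iff_lt_or_eq.mp hbm1 with hlt | heq
        · exact ihB.2.1 a b hab hlt hS
        · -- b = m: contradiction with the failed lookup
          exfalso
          subst heq
          have hPa : Pf nums k a = Pf nums k b - Pf nums k nums.length := by omega
          classical
          have hfg := Nat.findGreatest_spec
            (P := fun j => Pf nums k j = Pf nums k b - Pf nums k nums.length)
            (m := a) (n := b - 1) (by omega) hPa
          have hj0b := Nat.findGreatest_le
            (P := fun j => Pf nums k j = Pf nums k b - Pf nums k nums.length) (b - 1)
          have hsome : st.1.get? (Pf nums k b - Pf nums k nums.length)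
              = some ((Nat.findGreatest (fun j => Pf nums k j = Pf nums k b - Pf nums k nums.length) (b - 1) : Nat) : Int) := by
            rw [ihI]
            refine ⟨_, by omega, rfl, hfg, ?_⟩
            intro j' h1 h2
            exact Nat.findGreatest_is_greatest h1 (by omega)
          rw [hlk] at hsome; exact absurd hsome (by simp)
    · -- some aI: a maximal matching prefix index exists
      obtain ⟨j, hj1, hj2, hj3, hj4⟩ := (ihI (Pf nums k m - Pf nums k nums.length) aI).mp hlk
      subst hj2
      simp only [gB, hlk]
      refine ⟨hInv', ?_, ?_, ?_⟩
      · rcases le_total st.2 ((m : Int) - (j : Int)) with hle | hle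
        · rw [min_eq_left hle]
          rcases ihB.1 with h0 | ⟨a, b, hab, hbm, hS, hbest⟩
          · exact Or.inl h0
          · exact Or.inr ⟨a, b, hab, by omega, hS, hbest⟩
        · rw [min_eq_right hle]
          exact Or.inr ⟨j, m, hj1, by omega, by omega, rfl⟩
      · rintro a b hab hbm1 hS
        rcases Nat.lt_succ_iff_lt_or_eq.mp hbm1 with hlt | heq
        · exact le_trans (min_le_left _ _) (ihB.2.1 a b hab hlt hS)
        · subst heq
          have haj : a ≤ j := by
            by_contra hcon
            rw [Nat.not_le] at hcon
            exact hj4 a hcon hab (by omega)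
          refine le_trans (min_le_right _ _) ?_
          omega
      · exact le_trans (min_le_left _ _) ihB.2.2

lemma combine (nums : List Int) (k : Int) (ans best : Int)
    (hA : AnsA nums k nums.length ans) (hB : BestB nums k (nums.length + 1) best) :
    ans = (nums.length : Int) - best := by
  obtain ⟨hA1, hA2, hA3⟩ := hA
  obtain ⟨hB1, hB2, hB3⟩ := hB
  apply le_antisymm
  · rcases hA1 with rfl | ⟨a, b, ⟨hab, hbn, hS⟩, -, rfl⟩
    · omega
    · have := hB2 a b hab (by omega) hS
      omega
  · rcases hB1 with rfl | ⟨a, b, hab, hbm, hS, rfl⟩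
    · omega
    · have := hA2 a b ⟨hab, by omega, hS⟩ (by omega)
      omega

lemma main_eq (nums : List Int) (k : Int) : solve nums k = solve_alt nums k := by
  have eA : solve nums k =
      (if (nums.map (fun n => (if n < k then (1 : Int) else 0) * (-1) + (if n > k then (1 : Int) else 0) * 1)).sum = 0 then
        (nums.length : Int)
      else
        ((PySem.List.pyRange ((((solvePrefixA k nums.reverse).reverse).length : Int) - 1) (-1) (-1)).foldl
          (fun (st : PySem.Dict Int Int × Int) i =>
            match (st.1.insert (PySem.List.pyGetD ((solvePrefixA k nums.reverse).reverse) i 0) i).get?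
                (-(PySem.List.pyGetD (solvePrefixA k nums) i 0)) with
            | some j => (st.1.insert (PySem.List.pyGetD ((solvePrefixA k nums.reverse).reverse) i 0) i,
                max st.2 ((nums.length : Int) - (j - i + 1)))
            | none => (st.1.insert (PySem.List.pyGetD ((solvePrefixA k nums.reverse).reverse) i 0) i, st.2))
          (PySem.Dict.empty, 0)).2) := rfl
  have eB : solve_alt nums k =
      (if PySem.List.pyGetD (nums.foldl (pstep k) [0]) (-1) 0 = 0 then (nums.length : Int)
      else
        (nums.length : Int) - ((PySem.List.enumerate (nums.foldl (pstep k) [0]) 0).foldl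
          (fun (st : PySem.Dict Int Int × Int) bp =>
            (st.1.insert bp.2 bp.1,
             match st.1.get? (bp.2 - PySem.List.pyGetD (nums.foldl (pstep k) [0]) (-1) 0) with
             | some a => min st.2 (bp.1 - a)
             | none => st.2))
          (PySem.Dict.empty, (nums.length : Int))).2) := rfl
  rw [eA, eB, fold_pstep_zero]
  have hcond : (nums.map (fun n => (if n < k then (1 : Int) else 0) * (-1) + (if n > k then (1 : Int) else 0) * 1)).sum
      = Pf nums k nums.length := by
    unfold Pf
    rw [List.take_of_length_le (le_refl nums.length)]
    congr 1
    apply List.map_congr_left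
    intro x _
    unfold sgn
    split_ifs <;> omega
  have hS : PySem.List.pyGetD ((List.range (nums.length + 1)).map (Pf nums k)) (-1) 0
      = Pf nums k nums.length := by
    rw [List.range_succ, List.map_append]
    exact PySem.List.pyGetD_neg_one_append_singleton _ _ _
  rw [hcond, hS]
  split_ifs with h0
  · rfl
  · rw [right_eq]
    simp only [solvePrefixA_eq]
    rw [loopA_conv, loopB_conv]
    exact combine nums k _ _ (A_inv nums k nums.length (le_refl _)).2 (B_inv nums k (nums.length + 1)).2

-- ===== VERDICT (by name: the statement is the Claim_ definition above) =====
theorem solve_spec : Claim_equal_solve := by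
  intro nums k _
  unfold Spec_solve
  exact main_eq nums k
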